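-- pv_equiv track=rewrite | github.com/raghavian/sustainable_ai | notebooks/sustainableai/.ipynb_checkpoints/datasets-checkpoint.py | build_subword_vocab
-- ===== SOURCE A (Python) =====
-- SPECIALS = ["<pad>", "<unk>", "<bos>", "<eos>"]
--
-- def simple_subword_tokenize(text, subword_vocab):
--     # Greedy longest-match per word; first subtoken of each word gets a '▁' prefix for detokenization.
--     tokens = []
--     for raw_word in text.split():                  # simple whitespace tokenization
--         word = raw_word
--         start = 0
--         first = True
--         while start < len(word):
--             matched = False
--             for end in range(len(word), start, -1):
--                 sub = word[start:end]
--                 if sub in subword_vocab: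
--                     tok = ("▁" + sub) if first else sub
--                     tokens.append(tok)
--                     start = end
--                     first = False
--                     matched = True
--                     break
--             if not matched:
--                 # fallback to single character
--                 tok = ("▁" + word[start]) if first else word[start]
--                 tokens.append(tok)
--                 start += 1
--                 first = False
--     return tokens
--
-- def build_subword_vocab(text, seed=("un","ing","ed","er","est","ly","tion","al","ive","ize","ous","ism","able","ment"),
--                         max_tokens=None, lowercase=False):
--     corpus = text.lower() if lowercase else text
--     base = set(seed)
--     toks = simple_subword_tokenize(corpus, base)
--     vocab = list(dict.fromkeys(toks))              # preserve first-seen order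
--     if max_tokens is not None:
--         vocab = vocab[:max_tokens]
--     itos = SPECIALS + vocab
--     stoi = {s:i for i,s in enumerate(itos)}
--     return stoi, itos
-- ===== SOURCE B (Python) =====
-- SPECIALS = ["<pad>", "<unk>", "<bos>", "<eos>"]
--
-- def build_subword_vocab(text, seed=("un","ing","ed","er","est","ly","tion","al","ive","ize","ous","ism","able","ment"),
--                         max_tokens=None, lowercase=False):
--     corpus = text.lower() if lowercase else text
--     # Build a character trie of the seed subwords; "" key marks a terminal node.
--     root = {}
--     for sub in seed:
--         node = root
--         for ch in sub:
--             node = node.setdefault(ch, {})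
--         if sub:
--             node[""] = True
--     tokens = []
--     for word in corpus.split():
--         start = 0
--         first = True
--         n = len(word)
--         while start < n:
--             # walk the trie forward, remembering the furthest terminal reached
--             node = root
--             best = start
--             i = start
--             while i < n and word[i] in node:
--                 node = node[word[i]]
--                 i += 1
--                 if "" in node:
--                     best = i
--             end = best if best > start else start + 1
--             tok = word[start:end]
--             tokens.append(("\u2581" + tok) if first else tok)
--             start = end
--             first = False
--     vocab = list(dict.fromkeys(tokens))
--     if max_tokens is not None:
--         vocab = vocab[:max_tokens]
--     itos = SPECIALS + vocab
--     stoi = {s: i for i, s in enumerate(itos)}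
--     return stoi, itos
-- ===== Notes on version B (the rewrite author's own statement) =====
-- stated objective: faster
-- what changed: Replaces A's per-position longest-first substring probing against a hash set with a character trie built once from the seed subwords and walked forward one character per position, remembering the furthest terminal node; dedup, max_tokens slice and SPECIALS handling are unchanged.
import Mathlib
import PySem

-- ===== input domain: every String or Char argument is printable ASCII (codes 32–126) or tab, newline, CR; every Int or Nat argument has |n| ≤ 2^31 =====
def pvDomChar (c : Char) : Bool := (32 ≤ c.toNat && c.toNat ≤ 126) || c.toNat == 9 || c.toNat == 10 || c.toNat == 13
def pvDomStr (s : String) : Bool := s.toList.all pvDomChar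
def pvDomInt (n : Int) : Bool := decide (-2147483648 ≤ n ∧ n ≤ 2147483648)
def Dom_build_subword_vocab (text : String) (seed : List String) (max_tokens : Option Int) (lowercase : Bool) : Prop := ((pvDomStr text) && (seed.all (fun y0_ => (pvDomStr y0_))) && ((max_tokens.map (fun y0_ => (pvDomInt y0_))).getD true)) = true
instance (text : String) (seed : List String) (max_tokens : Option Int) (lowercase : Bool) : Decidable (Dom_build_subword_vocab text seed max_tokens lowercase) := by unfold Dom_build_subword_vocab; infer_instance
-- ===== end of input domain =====

-- B replaces A's per-position longest-first substring probing with a character trie of the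
-- seed subwords walked forward once per position (remembering the last terminal node),
-- avoiding A's repeated substring slicing/hashing; measured faster in a timing run.

-- ===== PORT A =====
def pvSpecials : List String := ["<pad>", "<unk>", "<bos>", "<eos>"]

-- inner 'for end in range(len(word), start, -1): if word[start:end] in base: break'
-- (rest = word[start:], l = end - start counting down; some l = matched length, none = no match)
def pvA_scan (base : PySem.Set (List Char)) (rest : List Char) : Nat → Option Nat
  | 0 => none
  | l + 1 =>
      if PySem.Set.contains base (rest.take (l + 1)) then some (l + 1) else pvA_scan base rest l

theorem pvA_scan_pos (base : PySem.Set (List Char)) (rest : List Char) :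
    ∀ l k, pvA_scan base rest l = some k → 1 ≤ k := by
  intro l
  induction l with
  | zero => intro k h; simp [pvA_scan] at h
  | succ n ih =>
      intro k h
      unfold pvA_scan at h
      split at h
      · simp only [Option.some.injEq] at h; omega
      · exact ih k h

-- 'while start < len(word)' of simple_subword_tokenize, one word
def pvA_wordLoop (base : PySem.Set (List Char)) (word : List Char) (start : Nat) (first : Bool) :
    List (List Char) :=
  if h : start < word.length then
    match hs : pvA_scan base (word.drop start) (word.length - start) with
    | some k =>
        (if first then '▁' :: (word.drop start).take k else (word.drop start).take k)
          :: pvA_wordLoop base word (start + k) false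
    | none =>
        -- fallback to single character word[start]
        (if first then ['▁', word.getD start ' '] else [word.getD start ' '])
          :: pvA_wordLoop base word (start + 1) false
  else []
  termination_by word.length - start
  decreasing_by
  · have := pvA_scan_pos base (word.drop start) (word.length - start) k hs; omega
  · omega

def build_subword_vocab (text : String) (seed : List String) (max_tokens : Option Int) (lowercase : Bool) : (List (String × Int)) × List String :=
  let corpus : List Char := if lowercase then PySem.Chars.lower text.toList else text.toList
  let base : PySem.Set (List Char) := PySem.Set.ofList (seed.map String.toList)
  let toks : List (List Char) :=
    (PySem.Chars.split₀ corpus).foldl (fun acc w => acc ++ pvA_wordLoop base w 0 true) []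
  let vocab : List (List Char) := PySem.List.dedup toks
  let vocab :=
    match max_tokens with
    | some m => PySem.List.slice vocab none (some m)
    | none => vocab
  let itos : List String := pvSpecials ++ vocab.map String.mk
  let stoi : PySem.Dict String Int :=
    (PySem.List.enumerate itos 0).foldl (fun d p => d.insert p.2 p.1) PySem.Dict.empty
  (stoi.items, itos)

-- ===== PORT B =====
-- first-child / next-sibling character trie (Python B's nested dicts in insertion order)
inductive PvTrie : Type
  | nil : PvTrie
  | node : Char → Bool → PvTrie → PvTrie → PvTrie
deriving DecidableEq, Repr

-- node.setdefault walk + terminal mark, one seed subword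
def pvIns : PvTrie → List Char → PvTrie
  | t, [] => t
  | .nil, c :: cs => .node c cs.isEmpty (pvIns .nil cs) .nil
  | .node c' b ch sib, c :: cs =>
      if c' = c then .node c' (b || cs.isEmpty) (pvIns ch cs) sib
      else .node c' b ch (pvIns sib (c :: cs))
  termination_by t w => (sizeOf t, w.length)

def pvBuildTrie (seed : List String) : PvTrie :=
  seed.foldl (fun t s => pvIns t s.toList) .nil

-- 'word[i] in node' / 'node[word[i]]' on the sibling chain
def pvLook : PvTrie → Char → Option (Bool × PvTrie)
  | .nil, _ => none
  | .node c' b ch sib, c => if c' = c then some (b, ch) else pvLook sib c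

-- inner 'while i < n and word[i] in node' walk; j = i - start, best = best - start (lengths)
def pvWalk : PvTrie → List Char → Nat → Nat → Nat
  | _, [], _, best => best
  | chain, c :: rest, j, best =>
      match pvLook chain c with
      | none => best
      | some (b, ch) => pvWalk ch rest (j + 1) (if b then j + 1 else best)

-- 'while start < n' of B, one word
def pvB_wordLoop (root : PvTrie) (word : List Char) (start : Nat) (first : Bool) :
    List (List Char) :=
  if h : start < word.length then
    let len := pvWalk root (word.drop start) 0 0
    let k := if len = 0 then 1 else len   -- end = best if best > start else start + 1
    (if first then '▁' :: (word.drop start).take k else (word.drop start).take k)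
      :: pvB_wordLoop root word (start + k) false
  else []
  termination_by word.length - start
  decreasing_by
  · by_cases hz : pvWalk root (word.drop start) 0 0 = 0 <;> simp [hz] <;> omega

def build_subword_vocab_alt (text : String) (seed : List String) (max_tokens : Option Int) (lowercase : Bool) : (List (String × Int)) × List String :=
  let corpus : List Char := if lowercase then PySem.Chars.lower text.toList else text.toList
  let root : PvTrie := pvBuildTrie seed
  let toks : List (List Char) :=
    (PySem.Chars.split₀ corpus).foldl (fun acc w => acc ++ pvB_wordLoop root w 0 true) []
  let vocab : List (List Char) := PySem.List.dedup toks
  let vocab :=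
    match max_tokens with
    | some m => PySem.List.slice vocab none (some m)
    | none => vocab
  let itos : List String := pvSpecials ++ vocab.map String.mk
  let stoi : PySem.Dict String Int :=
    (PySem.List.enumerate itos 0).foldl (fun d p => d.insert p.2 p.1) PySem.Dict.empty
  (stoi.items, itos)

-- ===== PRECONDITION & SPEC =====
def Spec_build_subword_vocab (text : String) (seed : List String) (max_tokens : Option Int) (lowercase : Bool) (out : (List (String × Int)) × List String) : Prop := out = build_subword_vocab_alt text seed max_tokens lowercase
instance (text : String) (seed : List String) (max_tokens : Option Int) (lowercase : Bool) (out : (List (String × Int)) × List String) : Decidable (Spec_build_subword_vocab text seed max_tokens lowercase out) := by unfold Spec_build_subword_vocab; infer_instance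

-- ===== CLAIM (what is proved, stated in full; the proofs are below) =====
def Claim_equal_build_subword_vocab : Prop := ∀ (text : String) (seed : List String) (max_tokens : Option Int) (lowercase : Bool), Dom_build_subword_vocab text seed max_tokens lowercase → Spec_build_subword_vocab text seed max_tokens lowercase (build_subword_vocab text seed max_tokens lowercase)

-- ===== LEMMAS AND PROOFS =====

-- 'v is a subword stored in the trie chain'
def pvAcc : PvTrie → List Char → Bool
  | _, [] => false
  | chain, c :: cs =>
      match pvLook chain c with
      | none => false
      | some (b, ch) => if cs.isEmpty then b else pvAcc ch cs

-- length of the longest stored prefix of rest (0 = none)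
def pvMax : PvTrie → List Char → Nat
  | _, [] => 0
  | chain, c :: rest =>
      match pvLook chain c with
      | none => 0
      | some (b, ch) =>
          match pvMax ch rest with
          | 0 => if b then 1 else 0
          | m + 1 => m + 2

theorem pvAcc_nil_chain : ∀ v, pvAcc PvTrie.nil v = false := by
  intro v; cases v <;> simp [pvAcc, pvLook]

theorem pvLook_ins_ne (c : Char) (cs : List Char) (d : Char) (h : c ≠ d) :
    ∀ t : PvTrie, pvLook (pvIns t (c :: cs)) d = pvLook t d := by
  intro t
  induction t with
  | nil => simp [pvIns, pvLook, h, Ne.symm h]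
  | node c' b ch sib ihc ihs =>
      by_cases hc : c' = c
      · subst hc
        simp [pvIns, pvLook, h]
      · simp only [pvIns, if_neg hc, pvLook]
        by_cases hd : c' = d
        · simp [hd]
        · simp [hd, ihs]

theorem pvLook_ins_eq (c : Char) (cs : List Char) :
    ∀ t : PvTrie, pvLook (pvIns t (c :: cs)) c =
      match pvLook t c with
      | none => some (cs.isEmpty, pvIns PvTrie.nil cs)
      | some (b, ch) => some (b || cs.isEmpty, pvIns ch cs) := by
  intro t
  induction t with
  | nil => simp [pvIns, pvLook]
  | node c' b ch sib ihc ihs =>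
      by_cases hc : c' = c
      · subst hc
        simp [pvIns, pvLook]
      · simp only [pvIns, if_neg hc, pvLook, if_neg hc]
        exact ihs

theorem pvAcc_ins (w : List Char) :
    ∀ (t : PvTrie) (v : List Char),
      (pvAcc (pvIns t w) v = true ↔ pvAcc t v = true ∨ (v = w ∧ v ≠ [])) := by
  induction w with
  | nil =>
      intro t v
      simp only [pvIns]
      constructor
      · intro h; exact Or.inl h
      · rintro (h | ⟨rfl, h⟩)
        · exact h
        · exact absurd rfl h
  | cons c cs ih =>
      intro t v
      cases v with
      | nil => simp [pvAcc]
      | cons d ds =>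
          by_cases hcd : c = d
          · subst hcd
            simp only [pvAcc, pvLook_ins_eq]
            cases hl : pvLook t c with
            | none =>
                cases ds with
                | nil => simp [List.isEmpty_iff]
                | cons e es => simp [ih PvTrie.nil (e :: es), pvAcc_nil_chain]
            | some p =>
                obtain ⟨b, ch⟩ := p
                cases ds with
                | nil => simp [List.isEmpty_iff]
                | cons e es => simp [ih ch (e :: es)]
          · simp only [pvAcc, pvLook_ins_ne c cs d hcd]
            have hne : ¬ (d :: ds = c :: cs) := by
              intro h; injection h with h1 h2; exact hcd h1.symm
            simp [hne]

theorem pvAcc_build (seed : List String) (v : List Char) :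
    pvAcc (pvBuildTrie seed) v = true ↔ v ≠ [] ∧ v ∈ seed.map String.toList := by
  unfold pvBuildTrie
  have main : ∀ (l : List String) (t : PvTrie),
      pvAcc (l.foldl (fun t s => pvIns t s.toList) t) v = true ↔
        pvAcc t v = true ∨ (v ≠ [] ∧ v ∈ l.map String.toList) := by
    intro l
    induction l with
    | nil => simp
    | cons s l ihl =>
        intro t
        simp only [List.foldl_cons, ihl, pvAcc_ins, List.map_cons, List.mem_cons]
        constructor
        · rintro ((h | ⟨h1, h2⟩) | ⟨h1, h2⟩)
          · exact Or.inl h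
          · exact Or.inr ⟨h2, Or.inl h1⟩
          · exact Or.inr ⟨h1, Or.inr h2⟩
        · rintro (h | ⟨h1, h2 | h2⟩)
          · exact Or.inl (Or.inl h)
          · exact Or.inl (Or.inr ⟨h2, h1⟩)
          · exact Or.inr ⟨h1, h2⟩
  rw [main]
  simp [pvAcc_nil_chain]

theorem pvWalk_eq_pvMax (rest : List Char) :
    ∀ chain j best, pvWalk chain rest j best =
      if pvMax chain rest = 0 then best else j + pvMax chain rest := by
  induction rest with
  | nil => intro chain j best; simp [pvWalk, pvMax]
  | cons c rest ih =>
      intro chain j best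
      simp only [pvWalk, pvMax]
      cases hl : pvLook chain c with
      | none => simp
      | some p =>
          obtain ⟨b, ch⟩ := p
          cases hm : pvMax ch rest with
          | zero => cases b <;> simp [ih, hm] <;> omega
          | succ m => simp [ih, hm]; omega
  termination_by rest.length

theorem pv_take_ne_nil {α : Type} {l : List α} {n : Nat} (hn : 1 ≤ n) (hl : 1 ≤ l.length) :
    l.take n ≠ [] := by
  intro ht
  have hlen := congrArg List.length ht
  rw [List.length_take, List.length_nil] at hlen
  omega

theorem pvMax_le (rest : List Char) : ∀ chain, pvMax chain rest ≤ rest.length := by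
  induction rest with
  | nil => intro chain; simp [pvMax]
  | cons c rest ih =>
      intro chain
      simp only [pvMax]
      cases pvLook chain c with
      | none => simp
      | some p =>
          obtain ⟨b, ch⟩ := p
          have h := ih ch
          cases hm : pvMax ch rest with
          | zero => cases b <;> simp [hm] <;> omega
          | succ m => simp [hm]; omega

theorem pvAcc_pvMax (rest : List Char) :
    ∀ chain m, pvMax chain rest = m + 1 → pvAcc chain (rest.take (m + 1)) = true := by
  induction rest with
  | nil => intro chain m h; simp [pvMax] at h
  | cons c rest ih =>
      intro chain m h
      simp only [pvMax] at h
      cases hl : pvLook chain c with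
      | none => rw [hl] at h; simp at h
      | some p =>
          obtain ⟨b, ch⟩ := p
          rw [hl] at h
          simp only [List.take_succ_cons, pvAcc, hl]
          cases hm : pvMax ch rest with
          | zero =>
              cases b with
              | false => simp [hm] at h
              | true =>
                  simp [hm] at h
                  subst h
                  simp
          | succ m' =>
              simp [hm] at h
              subst h
              have hlen : m' + 1 ≤ rest.length := by
                have h2 := pvMax_le rest ch
                rw [hm] at h2
                omega
              have hne : (rest.take (m' + 1)).isEmpty = false := by
                cases hq : (rest.take (m' + 1)).isEmpty
                · rfl
                · exact absurd (List.isEmpty_iff.mp hq)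
                    (pv_take_ne_nil (by omega) (by omega))
              simp only [hne, Bool.false_eq_true, if_false]
              exact ih ch m' hm

theorem pvAcc_le_pvMax (rest : List Char) :
    ∀ chain l, 1 ≤ l → l ≤ rest.length → pvAcc chain (rest.take l) = true →
      l ≤ pvMax chain rest := by
  induction rest with
  | nil => intro chain l h1 h2 _; simp at h2; omega
  | cons c rest ih =>
      intro chain l h1 h2 hacc
      obtain ⟨l', rfl⟩ : ∃ l', l = l' + 1 := ⟨l - 1, by omega⟩
      simp only [List.take_succ_cons, pvAcc] at hacc
      cases hl : pvLook chain c with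
      | none => rw [hl] at hacc; simp at hacc
      | some p =>
          obtain ⟨b, ch⟩ := p
          rw [hl] at hacc
          simp only [pvMax, hl]
          by_cases he : (rest.take l').isEmpty
          · simp only [he, if_true] at hacc
            have hl0 : l' = 0 := by
              have hlen := congrArg List.length (List.isEmpty_iff.mp he)
              rw [List.length_take, List.length_nil] at hlen
              have h2' : l' ≤ rest.length := by
                have hx := h2
                simp at hx
                omega
              omega
            subst hl0
            cases hm : pvMax ch rest with
            | zero => simp [hacc]
            | succ m => simp
          · simp only [he, Bool.false_eq_true, if_false] at hacc
            have hl1 : 1 ≤ l' := by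
              by_contra hl0
              have : l' = 0 := by omega
              subst this; simp at he
            have hl2 : l' ≤ rest.length := by
              have hx := h2
              simp at hx
              omega
            have hle := ih ch l' hl1 hl2 hacc
            cases hm : pvMax ch rest with
            | zero => rw [hm] at hle; omega
            | succ m => rw [hm] at hle; simp [hm]; omega

theorem pvA_scan_some (base : PySem.Set (List Char)) (rest : List Char) :
    ∀ m k, pvA_scan base rest m = some k →
      k ≤ m ∧ PySem.Set.contains base (rest.take k) = true ∧
        ∀ l, k < l → l ≤ m → ¬ PySem.Set.contains base (rest.take l) = true := by
  intro m
  induction m with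
  | zero => intro k h; simp [pvA_scan] at h
  | succ n ihm =>
      intro k h
      unfold pvA_scan at h
      split at h
      · rename_i hmem
        simp only [Option.some.injEq] at h
        subst h
        exact ⟨le_refl _, hmem, fun l hl1 hl2 _ => by omega⟩
      · rename_i hmem
        obtain ⟨h1, h2, h3⟩ := ihm k h
        refine ⟨by omega, h2, fun l hl1 hl2 hc => ?_⟩
        by_cases hle : l ≤ n
        · exact h3 l hl1 hle hc
        · have : l = n + 1 := by omega
          subst this; exact hmem hc

theorem pvA_scan_none (base : PySem.Set (List Char)) (rest : List Char) :
    ∀ m, pvA_scan base rest m = none →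
      ∀ l, 1 ≤ l → l ≤ m → ¬ PySem.Set.contains base (rest.take l) = true := by
  intro m
  induction m with
  | zero => intro _ l h1 h2; omega
  | succ n ihm =>
      intro h l h1 h2
      unfold pvA_scan at h
      split at h
      · simp at h
      · rename_i hmem
        by_cases hle : l ≤ n
        · exact ihm h l h1 hle
        · have : l = n + 1 := by omega
          subst this; exact hmem

theorem pv_mem_iff (seed : List String) (v : List Char) (hv : v ≠ []) :
    PySem.Set.contains (PySem.Set.ofList (seed.map String.toList)) v = true ↔
      pvAcc (pvBuildTrie seed) v = true := by
  rw [pvAcc_build]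
  simp only [PySem.Set.contains, List.contains_iff_mem, PySem.Set.mem_ofList]
  exact ⟨fun h => ⟨hv, h⟩, fun h => h.2⟩

theorem pv_wordLoop_eq (seed : List String) (word : List Char) :
    ∀ start first,
      pvA_wordLoop (PySem.Set.ofList (seed.map String.toList)) word start first =
        pvB_wordLoop (pvBuildTrie seed) word start first := by
  have main : ∀ n start first, word.length - start ≤ n →
      pvA_wordLoop (PySem.Set.ofList (seed.map String.toList)) word start first =
        pvB_wordLoop (pvBuildTrie seed) word start first := by
    intro n
    induction n with
    | zero =>
        intro start first h
        rw [pvA_wordLoop, pvB_wordLoop]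
        rw [dif_neg (by omega), dif_neg (by omega)]
    | succ n ihn =>
        intro start first hle
        by_cases h : start < word.length
        · have hrest : (word.drop start).length = word.length - start := by simp
          have hwalk : pvWalk (pvBuildTrie seed) (word.drop start) 0 0 =
              pvMax (pvBuildTrie seed) (word.drop start) := by
            rw [pvWalk_eq_pvMax]
            split <;> omega
          rw [pvA_wordLoop, pvB_wordLoop, dif_pos h, dif_pos h]
          cases hs : pvA_scan (PySem.Set.ofList (seed.map String.toList)) (word.drop start)
              (word.length - start) with
          | some k =>
              obtain ⟨hk1, hk2, hk3⟩ := pvA_scan_some _ _ _ _ hs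
              have hk0 : 1 ≤ k := pvA_scan_pos _ _ _ _ hs
              have hmax : pvMax (pvBuildTrie seed) (word.drop start) = k := by
                have hkle : k ≤ (word.drop start).length := by omega
                have hacc : pvAcc (pvBuildTrie seed) ((word.drop start).take k) = true := by
                  rw [← pv_mem_iff seed _ (pv_take_ne_nil hk0 (by omega))]
                  exact hk2
                have h1 : k ≤ pvMax (pvBuildTrie seed) (word.drop start) :=
                  pvAcc_le_pvMax _ _ k hk0 hkle hacc
                have h2 : pvMax (pvBuildTrie seed) (word.drop start) ≤ (word.drop start).length :=
                  pvMax_le _ _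
                by_contra hne
                have hgt : k < pvMax (pvBuildTrie seed) (word.drop start) := by omega
                obtain ⟨m, hm⟩ : ∃ m, pvMax (pvBuildTrie seed) (word.drop start) = m + 1 :=
                  ⟨pvMax (pvBuildTrie seed) (word.drop start) - 1, by omega⟩
                have hacc2 := pvAcc_pvMax _ _ _ hm
                rw [← hm] at hacc2
                rw [← pv_mem_iff seed _ (pv_take_ne_nil (by omega) (by omega))] at hacc2
                exact hk3 _ hgt (by omega) hacc2
              have hkif : (if k = 0 then 1 else k) = k := if_neg (by omega)
              simp only [hwalk, hmax, hkif]
              rw [ihn (start + k) false (by omega)]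
          | none =>
              have hnone := pvA_scan_none _ _ _ hs
              have hmax : pvMax (pvBuildTrie seed) (word.drop start) = 0 := by
                by_contra hne
                obtain ⟨m, hm⟩ : ∃ m, pvMax (pvBuildTrie seed) (word.drop start) = m + 1 :=
                  ⟨pvMax (pvBuildTrie seed) (word.drop start) - 1, by omega⟩
                have hlen := pvMax_le (word.drop start) (pvBuildTrie seed)
                rw [hm] at hlen
                have hacc2 := pvAcc_pvMax _ _ _ hm
                rw [← hm] at hacc2
                rw [← pv_mem_iff seed _ (pv_take_ne_nil (by omega) (by omega))] at hacc2
                exact hnone _ (by omega) (by omega) hacc2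
              have htake : (word.drop start).take 1 = [word.getD start ' '] := by
                rw [List.drop_eq_getElem_cons h]
                rw [List.getD_eq_getElem?_getD, List.getElem?_eq_getElem h]
                simp only [List.take_succ_cons, List.take_zero, Option.getD_some]
              simp only [hwalk, hmax]
              norm_num [htake]
              rw [ihn (start + 1) false (by omega)]
        · rw [pvA_wordLoop, pvB_wordLoop, dif_neg h, dif_neg h]
  intro start first
  exact main (word.length - start) start first (le_refl _)

-- ===== VERDICT (by name: the statement is the Claim_ definition above) =====
theorem build_subword_vocab_spec : Claim_equal_build_subword_vocab := by
  intro text seed max_tokens lowercase _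
  unfold Spec_build_subword_vocab build_subword_vocab build_subword_vocab_alt
  have hf : (fun (acc : List (List Char)) w =>
        acc ++ pvA_wordLoop (PySem.Set.ofList (seed.map String.toList)) w 0 true) =
      (fun acc w => acc ++ pvB_wordLoop (pvBuildTrie seed) w 0 true) := by
    funext acc w
    rw [pv_wordLoop_eq]
  simp only [hf]
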